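-- pv_equiv track=rewrite | github.com/Jules14S/workout-transcription-app | app.py | transcribe_text_to_table
-- ===== SOURCE A (Python) =====
-- def transcribe_text_to_table(text):
--     """Convert extracted text into a structured table format"""
--     lines = text.split('\n')
--     data = []
--     max_sets = 0
--
--     for line in lines:
--         line = line.replace('.', ':')  # Replace periods with colons to fix formatting issues
--         if '/' in line:
--             parts = line.split(':')
--             if len(parts) < 2:
--                 continue
--             sets = parts[1].strip().split('/')
--             sets = [s.strip() for s in sets if s.strip().isdigit() or s.strip() == '']
--             max_sets = max(max_sets, len(sets))
--
--     for line in lines: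
--         line = line.replace('.', ':')  # Replace periods with colons to fix formatting issues
--         if '/' in line:
--             parts = line.split(':')
--             if len(parts) < 2:
--                 continue
--
--             exercise = parts[0].strip()
--             sets = parts[1].strip().split('/')
--
--             sets = [s.strip() for s in sets if s.strip().isdigit() or s.strip() == '']
--
--             while len(sets) < max_sets:
--                 sets.append('')
--
--             extra_info = ""
--             if '(' in parts[1]:
--                 extra_info = parts[1].split('(')[1].split(')')[0]
--
--             row = [exercise] + sets
--             row.append(extra_info if extra_info else '')
--
--             data.append(row)
--
--     return data, max_sets
-- ===== SOURCE B (Python) =====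
-- def transcribe_text_to_table(text):
--     """Convert extracted text into a structured table format (single parse pass, then a pad pass)"""
--     rows = []
--     max_sets = 0
--
--     for line in text.split('\n'):
--         line = line.replace('.', ':')
--         if '/' not in line:
--             continue
--         parts = line.split(':')
--         if len(parts) < 2:
--             continue
--         exercise = parts[0].strip()
--         body = parts[1]
--         sets = [s.strip() for s in body.strip().split('/')
--                 if s.strip().isdigit() or s.strip() == '']
--         extra_info = body.split('(')[1].split(')')[0] if '(' in body else ''
--         rows.append((exercise, sets, extra_info))
--         if len(sets) > max_sets:
--             max_sets = len(sets)
--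
--     data = [[exercise] + sets + [''] * (max_sets - len(sets)) + [extra_info]
--             for exercise, sets, extra_info in rows]
--     return data, max_sets
-- ===== Notes on version B (the rewrite author's own statement) =====
-- stated objective: simpler
-- what changed: A parses every line twice (one full pass just to find max_sets, then a second identical parse to build padded rows, padding with a while-append loop); B parses each line once, collecting raw (exercise, sets, extra) triples and max_sets together, then pads in a separate map-style pass using list multiplication.
import Mathlib
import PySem

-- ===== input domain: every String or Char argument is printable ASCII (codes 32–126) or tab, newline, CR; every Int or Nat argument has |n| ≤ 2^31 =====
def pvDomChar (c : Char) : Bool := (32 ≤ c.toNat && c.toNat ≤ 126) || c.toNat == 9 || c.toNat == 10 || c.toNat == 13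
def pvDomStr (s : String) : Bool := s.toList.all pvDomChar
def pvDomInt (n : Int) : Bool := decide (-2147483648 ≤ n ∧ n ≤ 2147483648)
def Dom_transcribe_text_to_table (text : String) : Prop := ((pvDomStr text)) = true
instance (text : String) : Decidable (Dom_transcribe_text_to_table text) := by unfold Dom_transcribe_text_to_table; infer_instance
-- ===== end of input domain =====

-- ===== PORT A =====
-- B changes only the decomposition: one parse pass + a separate pad pass instead of A's two identical parse passes; same values.

-- helper for Python's s.split(sep) with a nonempty literal sep (Str.split? is some there; exact)
def pySplit (s sep : String) : List String := (PySem.Str.split? s sep).getD []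

-- A's `while len(sets) < max_sets: sets.append('')` loop, transliterated
def padWhile (sets : List String) (m : Int) : List String :=
  if (sets.length : Int) < m then padWhile (sets ++ [""]) m else sets
termination_by (m - sets.length).toNat
decreasing_by simp; omega

def transcribe_text_to_table (text : String) : List (List String) × Int :=
  let lines := pySplit text "\n"
  let max_sets : Int := lines.foldl (fun max_sets line =>
    let line := PySem.Str.replace line "." ":"
    if PySem.Str.isIn "/" line then
      let parts := pySplit line ":"
      if parts.length < 2 then max_sets
      else
        let sets := pySplit (PySem.Str.strip parts[1]!) "/"
        let sets := (sets.filter (fun s =>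
          PySem.Str.strIsdigit (PySem.Str.strip s) || PySem.Str.strip s == "")).map PySem.Str.strip
        max max_sets (sets.length : Int)
    else max_sets) 0
  let data := lines.foldl (fun data line =>
    let line := PySem.Str.replace line "." ":"
    if PySem.Str.isIn "/" line then
      let parts := pySplit line ":"
      if parts.length < 2 then data
      else
        let exercise := PySem.Str.strip parts[0]!
        let sets := pySplit (PySem.Str.strip parts[1]!) "/"
        let sets := (sets.filter (fun s =>
          PySem.Str.strIsdigit (PySem.Str.strip s) || PySem.Str.strip s == "")).map PySem.Str.strip
        let sets := padWhile sets max_sets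
        let extra_info :=
          if PySem.Str.isIn "(" parts[1]! then
            (pySplit (pySplit parts[1]! "(")[1]! ")")[0]!
          else ""
        let row := [exercise] ++ sets
        let row := row ++ [if extra_info == "" then "" else extra_info]
        data ++ [row]
    else data) []
  (data, max_sets)

-- ===== PORT B =====
def transcribe_text_to_table_alt (text : String) : List (List String) × Int :=
  let st := (pySplit text "\n").foldl
    (fun (st : List (String × List String × String) × Int) line =>
      let line := PySem.Str.replace line "." ":"
      if !PySem.Str.isIn "/" line then st
      else
        let parts := pySplit line ":"
        if parts.length < 2 then st
        else
          let exercise := PySem.Str.strip parts[0]!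
          let body := parts[1]!
          let sets := ((pySplit (PySem.Str.strip body) "/").filter (fun s =>
            PySem.Str.strIsdigit (PySem.Str.strip s) || PySem.Str.strip s == "")).map PySem.Str.strip
          let extra_info :=
            if PySem.Str.isIn "(" body then (pySplit (pySplit body "(")[1]! ")")[0]! else ""
          (st.1 ++ [(exercise, sets, extra_info)],
           if (sets.length : Int) > st.2 then (sets.length : Int) else st.2))
    ([], 0)
  (st.1.map (fun r => [r.1] ++ r.2.1 ++ List.replicate (st.2 - r.2.1.length).toNat "" ++ [r.2.2]),
   st.2)

-- ===== PRECONDITION & SPEC =====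
def Spec_transcribe_text_to_table (text : String) (out : List (List String) × Int) : Prop := out = transcribe_text_to_table_alt text
instance (text : String) (out : List (List String) × Int) : Decidable (Spec_transcribe_text_to_table text out) := by unfold Spec_transcribe_text_to_table; infer_instance

-- ===== CLAIM (what is proved, stated in full; the proofs are below) =====
def Claim_equal_transcribe_text_to_table : Prop := ∀ (text : String), Dom_transcribe_text_to_table text → Spec_transcribe_text_to_table text (transcribe_text_to_table text)

-- ===== LEMMAS AND PROOFS =====

-- per-line parse result shared by the reasoning: none = line skipped, some (exercise, sets, extra)
def parseLine (line : String) : Option (String × List String × String) :=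
  let line := PySem.Str.replace line "." ":"
  if PySem.Str.isIn "/" line then
    let parts := pySplit line ":"
    if parts.length < 2 then none
    else
      some (PySem.Str.strip parts[0]!,
        ((pySplit (PySem.Str.strip parts[1]!) "/").filter (fun s =>
          PySem.Str.strIsdigit (PySem.Str.strip s) || PySem.Str.strip s == "")).map PySem.Str.strip,
        if PySem.Str.isIn "(" parts[1]! then (pySplit (pySplit parts[1]! "(")[1]! ")")[0]! else "")
  else none

def refMax (lines : List String) (m : Int) : Int :=
  lines.foldl (fun m l => match parseLine l with
    | some (_, s, _) => max m (s.length : Int)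
    | none => m) m

lemma padWhile_eq (sets : List String) (m : Int) :
    padWhile sets m = sets ++ List.replicate (m - sets.length).toNat "" := by
  fun_induction padWhile sets m with
  | case1 sets h ih =>
      rw [ih, List.append_assoc]
      congr 1
      have h2 : (m - (sets ++ [""]).length).toNat + 1 = (m - sets.length).toNat := by
        simp; omega
      rw [← h2, List.replicate_succ]
      simp
  | case2 sets h =>
      have h0 : (m - sets.length).toNat = 0 := by omega
      simp [h0]

lemma refMax_cons (l : String) (tl : List String) (m : Int) :
    refMax (l :: tl) m = refMax tl (match parseLine l with
      | some (_, st, _) => max m (st.length : Int)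
      | none => m) := rfl

lemma ite_max (a b : Int) : (if a > b then a else b) = max b a := by
  split <;> omega

lemma maxA_eq (lines : List String) (m : Int) :
    lines.foldl (fun max_sets line =>
      let line := PySem.Str.replace line "." ":"
      if PySem.Str.isIn "/" line then
        let parts := pySplit line ":"
        if parts.length < 2 then max_sets
        else
          let sets := pySplit (PySem.Str.strip parts[1]!) "/"
          let sets := (sets.filter (fun s =>
            PySem.Str.strIsdigit (PySem.Str.strip s) || PySem.Str.strip s == "")).map PySem.Str.strip
          max max_sets (sets.length : Int)
      else max_sets) m = refMax lines m := by
  induction lines generalizing m with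
  | nil => rfl
  | cons l tl ih =>
      rw [List.foldl_cons, ih, refMax_cons]
      congr 1
      simp only [parseLine]
      by_cases h1 : PySem.Str.isIn "/" (PySem.Str.replace l "." ":") = true
      · by_cases h2 : (pySplit (PySem.Str.replace l "." ":") ":").length < 2
        · simp only [h1, if_true, h2]
        · simp only [h1, if_true, h2, if_false]
      · simp only [Bool.not_eq_true] at h1
        simp only [h1, Bool.false_eq_true, if_false]

lemma foldB_eq (lines : List String) (st : List (String × List String × String) × Int) :
    lines.foldl
      (fun (st : List (String × List String × String) × Int) line =>
        let line := PySem.Str.replace line "." ":"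
        if !PySem.Str.isIn "/" line then st
        else
          let parts := pySplit line ":"
          if parts.length < 2 then st
          else
            let exercise := PySem.Str.strip parts[0]!
            let body := parts[1]!
            let sets := ((pySplit (PySem.Str.strip body) "/").filter (fun s =>
              PySem.Str.strIsdigit (PySem.Str.strip s) || PySem.Str.strip s == "")).map PySem.Str.strip
            let extra_info :=
              if PySem.Str.isIn "(" body then (pySplit (pySplit body "(")[1]! ")")[0]! else ""
            (st.1 ++ [(exercise, sets, extra_info)],
             if (sets.length : Int) > st.2 then (sets.length : Int) else st.2))
      st = (st.1 ++ lines.filterMap parseLine, refMax lines st.2) := by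
  induction lines generalizing st with
  | nil => simp only [List.foldl_nil, List.filterMap_nil, List.append_nil, refMax]
  | cons l tl ih =>
      rw [List.foldl_cons, ih, List.filterMap_cons, refMax_cons]
      simp only [parseLine]
      by_cases h1 : PySem.Str.isIn "/" (PySem.Str.replace l "." ":") = true
      · by_cases h2 : (pySplit (PySem.Str.replace l "." ":") ":").length < 2
        · simp only [h1, Bool.not_true, Bool.false_eq_true, if_false, if_true, h2]
        · simp only [h1, Bool.not_true, Bool.false_eq_true, if_false, if_true, h2]
          rw [ite_max]
          simp only [List.append_assoc, List.singleton_append]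
      · simp only [Bool.not_eq_true] at h1
        simp only [h1, Bool.not_false, if_true, Bool.false_eq_true, if_false]

lemma ite_beq_self (x : String) : (if x == "" then "" else x) = x := by
  by_cases h : x = "" <;> simp [h]

set_option maxHeartbeats 1000000 in
lemma dataA_eq (lines : List String) (acc : List (List String)) (m : Int) :
    lines.foldl (fun data line =>
      let line := PySem.Str.replace line "." ":"
      if PySem.Str.isIn "/" line then
        let parts := pySplit line ":"
        if parts.length < 2 then data
        else
          let exercise := PySem.Str.strip parts[0]!
          let sets := pySplit (PySem.Str.strip parts[1]!) "/"
          let sets := (sets.filter (fun s =>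
            PySem.Str.strIsdigit (PySem.Str.strip s) || PySem.Str.strip s == "")).map PySem.Str.strip
          let sets := padWhile sets m
          let extra_info :=
            if PySem.Str.isIn "(" parts[1]! then
              (pySplit (pySplit parts[1]! "(")[1]! ")")[0]!
            else ""
          let row := [exercise] ++ sets
          let row := row ++ [if extra_info == "" then "" else extra_info]
          data ++ [row]
      else data) acc
    = acc ++ (lines.filterMap parseLine).map
        (fun r => [r.1] ++ r.2.1 ++ List.replicate (m - r.2.1.length).toNat "" ++ [r.2.2]) := by
  induction lines generalizing acc with
  | nil => simp only [List.foldl_nil, List.filterMap_nil, List.map_nil, List.append_nil]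
  | cons l tl ih =>
      rw [List.foldl_cons, List.filterMap_cons]
      simp only [parseLine]
      by_cases h1 : PySem.Str.isIn "/" (PySem.Str.replace l "." ":") = true
      · by_cases h2 : (pySplit (PySem.Str.replace l "." ":") ":").length < 2
        · simp only [h1, if_true, h2]
          exact ih acc
        · simp only [h1, if_true, h2, if_false]
          rw [padWhile_eq, ite_beq_self, ih]
          simp only [parseLine, List.map_cons, List.cons_append, 
            List.append_assoc, List.nil_append]
      · simp only [Bool.not_eq_true] at h1
        simp only [h1, Bool.false_eq_true, if_false]
        exact ih acc

-- ===== VERDICT (by name: the statement is the Claim_ definition above) =====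
set_option maxHeartbeats 1000000 in
theorem transcribe_text_to_table_spec : Claim_equal_transcribe_text_to_table := by
  intro text _
  unfold Spec_transcribe_text_to_table transcribe_text_to_table transcribe_text_to_table_alt
  simp only []
  rw [maxA_eq, dataA_eq, foldB_eq]
  simp only [List.nil_append]
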